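-- pv_equiv track=rewrite | github.com/rara-ran/codetree-TILs | 240508/금 채굴하기/gold-mining.py | make_gold
-- ===== SOURCE A (Python) =====
-- def make_gold(k, maps, n):
--     # gold_cnt = 0
--     arr = []
--     dx, dy = [k,-k,0,0], [0,0,k,-k] # 상하좌우
--
--     if k == 1:
--         for i in range(n):
--             for j in range(n):
--                 gold_cnt = 0
--                 if maps[i][j] == 1:
--                     gold_cnt += 1
--                 for d in range(4):
--                     if i+dx[d] < 0 or j+dy[d] < 0 or i+dx[d] >= n or j+dy[d] >= n:
--                         continue
--                     if maps[i+dx[d]][j+dy[d]] == 1: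
--                         gold_cnt += 1
--                 arr.append(gold_cnt)
--         return arr
--
--     else:
--         for i in range(n):
--             for j in range(n):
--
--                 gold_cnt = 0
--
--                 for idx in range(k):
--                     for idy in range(j-idx, j+idx+1):
--                         if i-k+idx < 0 or i-k+idx >= n or idy >= n or idy < 0:
--                             continue
--                         if maps[i-k+idx][idy] == 1:
--                             gold_cnt += 1
--                         if i+k-idx < 0 or i+k-idx >= n:
--                             continue
--                         if maps[i+k-idx][idy] == 1:
--                             gold_cnt += 1
--                 for c in range(j-k, j+k+1):
--                     if c < 0 or c >= n:
--                         continue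
--                     if maps[i][c] == 1:
--                         gold_cnt += 1
--
--                 arr.append(gold_cnt)
--         return arr
-- ===== SOURCE B (Python) =====
-- def make_gold(k, maps, n):
--     # Per-row prefix sums of the ones-indicator; each cell's diamond count is a
--     # sum of clipped row-interval queries.
--     P = []
--     for r in range(n):
--         row = maps[r]
--         ps = [0]
--         for c in range(n):
--             ps.append(ps[-1] + (1 if row[c] == 1 else 0))
--         P.append(ps)
--     arr = []
--     for i in range(n):
--         for j in range(n):
--             total = 0
--             for r in range(max(0, i - k), min(n - 1, i + k) + 1):
--                 w = k - abs(r - i)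
--                 lo = max(0, j - w)
--                 hi = min(n - 1, j + w)
--                 if lo <= hi:
--                     total += P[r][hi + 1] - P[r][lo]
--             arr.append(total)
--     return arr
-- ===== Notes on version B (the rewrite author's own statement) =====
-- stated objective: faster
-- what changed: B precomputes per-row prefix sums of the ones-indicator once and answers each cell with O(k) clipped interval queries over the diamond's rows, instead of A's per-cell O(k^2) guarded scan of every diamond position.
-- intended difference: For k >= 2, whenever some cell with value 1 lies in rows 1..min(n-1,2k-1), A undercounts near the top edge (its shared 'continue' for an out-of-range upper row also skips the in-range mirrored lower row), e.g. returning [0,0,1,1] on (2,[[0,0],[1,0]],2); B counts the full Manhattan-distance-k diamond and returns [1,1,1,1], which is the intended count. — e.g. on make_gold(2, [[0, 0], [1, 0]], 2): A returns [0, 0, 1, 1], B returns [1, 1, 1, 1]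
-- outside the precondition, e.g. on make_gold(-1, [], 1): A returns [0], B raises IndexError; on make_gold(-2, [[1]], 2): A returns [0, 0, 0, 0], B raises IndexError
import Mathlib
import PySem

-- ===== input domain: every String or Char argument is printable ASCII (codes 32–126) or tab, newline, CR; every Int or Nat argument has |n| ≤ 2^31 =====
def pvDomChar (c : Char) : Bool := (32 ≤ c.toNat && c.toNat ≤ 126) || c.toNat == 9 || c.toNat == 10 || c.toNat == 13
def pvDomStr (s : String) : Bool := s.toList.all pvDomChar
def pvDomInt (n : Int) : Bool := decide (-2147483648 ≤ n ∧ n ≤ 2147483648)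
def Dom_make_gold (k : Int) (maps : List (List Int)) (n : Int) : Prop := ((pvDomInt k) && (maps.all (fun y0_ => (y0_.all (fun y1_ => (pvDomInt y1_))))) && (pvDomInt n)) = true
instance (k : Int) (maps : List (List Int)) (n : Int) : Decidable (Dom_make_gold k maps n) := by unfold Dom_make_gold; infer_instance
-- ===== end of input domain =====

-- B replaces A's per-cell guarded diamond scan by per-row prefix sums with one clipped
-- interval query per diamond row (fewer operations per cell; speed not measured here).
-- On inputs where A's shared 'continue' skips in-range lower rows (D_ below) B returns
-- the full Manhattan-distance-k diamond count.

-- ===== PORT A =====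
def make_gold (k : Int) (maps : List (List Int)) (n : Int) : List Int :=
  let dx : List Int := [k, -k, 0, 0]
  let dy : List Int := [0, 0, k, -k]
  if k == 1 then
    (PySem.List.pyRange 0 n 1).foldl (fun arr i =>
      (PySem.List.pyRange 0 n 1).foldl (fun arr j =>
        let gold0 : Int := if PySem.List.pyGetD (PySem.List.pyGetD maps i []) j 0 == 1 then 1 else 0
        let gold := (PySem.List.pyRange 0 4 1).foldl (fun g d =>
          let ddx := PySem.List.pyGetD dx d 0
          let ddy := PySem.List.pyGetD dy d 0
          if i + ddx < 0 ∨ j + ddy < 0 ∨ i + ddx ≥ n ∨ j + ddy ≥ n then g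
          else if PySem.List.pyGetD (PySem.List.pyGetD maps (i + ddx) []) (j + ddy) 0 == 1 then g + 1 else g) gold0
        arr ++ [gold]) arr) []
  else
    (PySem.List.pyRange 0 n 1).foldl (fun arr i =>
      (PySem.List.pyRange 0 n 1).foldl (fun arr j =>
        let g1 := (PySem.List.pyRange 0 k 1).foldl (fun g idx =>
          (PySem.List.pyRange (j - idx) (j + idx + 1) 1).foldl (fun g idy =>
            if i - k + idx < 0 ∨ i - k + idx ≥ n ∨ idy ≥ n ∨ idy < 0 then g
            else
              let g := if PySem.List.pyGetD (PySem.List.pyGetD maps (i - k + idx) []) idy 0 == 1 then g + 1 else g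
              if i + k - idx < 0 ∨ i + k - idx ≥ n then g
              else if PySem.List.pyGetD (PySem.List.pyGetD maps (i + k - idx) []) idy 0 == 1 then g + 1 else g) g) (0 : Int)
        let g2 := (PySem.List.pyRange (j - k) (j + k + 1) 1).foldl (fun g c =>
          if c < 0 ∨ c ≥ n then g
          else if PySem.List.pyGetD (PySem.List.pyGetD maps i []) c 0 == 1 then g + 1 else g) g1
        arr ++ [g2]) arr) []

-- ===== PORT B =====
def make_gold_alt (k : Int) (maps : List (List Int)) (n : Int) : List Int :=
  let P : List (List Int) := (PySem.List.pyRange 0 n 1).foldl (fun P r =>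
    let row := PySem.List.pyGetD maps r []
    let ps : List Int := (PySem.List.pyRange 0 n 1).foldl (fun ps c =>
      ps ++ [PySem.List.pyGetD ps (-1) 0 + (if PySem.List.pyGetD row c 0 == 1 then 1 else 0)]) [(0 : Int)]
    P ++ [ps]) []
  (PySem.List.pyRange 0 n 1).foldl (fun arr i =>
    (PySem.List.pyRange 0 n 1).foldl (fun arr j =>
      let total := (PySem.List.pyRange (max 0 (i - k)) (min (n - 1) (i + k) + 1) 1).foldl (fun t r =>
        let w := k - |r - i|
        let lo := max 0 (j - w)
        let hi := min (n - 1) (j + w)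
        if lo ≤ hi then
          t + (PySem.List.pyGetD (PySem.List.pyGetD P r []) (hi + 1) 0 -
               PySem.List.pyGetD (PySem.List.pyGetD P r []) lo 0)
        else t) (0 : Int)
      arr ++ [total]) arr) []

-- ===== PRECONDITION & SPEC =====
-- Pre_ = the n×n grid really exists: at least n rows, the first n rows of length ≥ n
-- (A raises IndexError otherwise whenever it touches the grid).  For k < 0 A never
-- touches the grid and returns a list of zeros even on an undersized maps; B always
-- builds the prefix table and raises there, so those inputs are excluded (see cites).
def Pre_make_gold (k : Int) (maps : List (List Int)) (n : Int) : Prop :=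
  n ≤ (maps.length : Int) ∧ ∀ row ∈ maps.take n.toNat, n ≤ (row.length : Int)
instance (k : Int) (maps : List (List Int)) (n : Int) : Decidable (Pre_make_gold k maps n) := by
  unfold Pre_make_gold; infer_instance
def pvWitness_make_gold : Int × List (List Int) × Int := (2, [[1, 0], [0, 1]], 2)

-- For k ≥ 2, whenever a cell with value 1 lies in rows 1..min(n-1, 2k-1), A undercounts
-- near the top edge (its shared 'continue' for an out-of-range upper row also skips the
-- in-range mirrored lower row); B counts the full Manhattan-distance-k diamond, the
-- intended value.
def D_make_gold (k : Int) (maps : List (List Int)) (n : Int) : Prop :=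
  2 ≤ k ∧ ∃ p ∈ maps.zipIdx, 1 ≤ p.2 ∧ (p.2 : Int) < n ∧ (p.2 : Int) ≤ 2 * k - 1 ∧
    ∃ q ∈ p.1.zipIdx, (q.2 : Int) < n ∧ q.1 = 1
instance (k : Int) (maps : List (List Int)) (n : Int) : Decidable (D_make_gold k maps n) := by
  unfold D_make_gold; infer_instance
def Spec_make_gold (k : Int) (maps : List (List Int)) (n : Int) (out : List Int) : Prop := ¬ D_make_gold k maps n → out = make_gold_alt k maps n
instance (k : Int) (maps : List (List Int)) (n : Int) (out : List Int) : Decidable (Spec_make_gold k maps n out) := by unfold Spec_make_gold; infer_instance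
def pvDiffWitness_make_gold : Int × List (List Int) × Int := (2, [[0, 0], [1, 0]], 2)
def pvDiffWitnessOut_make_gold : (List Int) × (List Int) := ([0, 0, 1, 1], [1, 1, 1, 1])

-- ===== CLAIM (what is proved, stated in full; the proofs are below) =====
def Claim_unchanged_make_gold : Prop := ∀ (k : Int) (maps : List (List Int)) (n : Int), Dom_make_gold k maps n → Pre_make_gold k maps n → Spec_make_gold k maps n (make_gold k maps n)
def Claim_changed_make_gold : Prop := Dom_make_gold (pvDiffWitness_make_gold.1) (pvDiffWitness_make_gold.2.1) (pvDiffWitness_make_gold.2.2) ∧ Pre_make_gold (pvDiffWitness_make_gold.1) (pvDiffWitness_make_gold.2.1) (pvDiffWitness_make_gold.2.2) ∧ D_make_gold (pvDiffWitness_make_gold.1) (pvDiffWitness_make_gold.2.1) (pvDiffWitness_make_gold.2.2) ∧ make_gold (pvDiffWitness_make_gold.1) (pvDiffWitness_make_gold.2.1) (pvDiffWitness_make_gold.2.2) = pvDiffWitnessOut_make_gold.1 ∧ make_gold_alt (pvDiffWitness_make_gold.1) (pvDiffWitness_make_gold.2.1) (pvDiffWitness_make_gold.2.2) = pvDiffWitnessOut_make_gold.2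 ∧ pvDiffWitnessOut_make_gold.1 ≠ pvDiffWitnessOut_make_gold.2
def Claim_exact_make_gold : Prop := ∀ (k : Int) (maps : List (List Int)) (n : Int), Dom_make_gold k maps n → Pre_make_gold k maps n → D_make_gold k maps n → make_gold k maps n ≠ make_gold_alt k maps n

-- ===== LEMMAS AND PROOFS =====

-- D_ stated over Int coordinates
theorem D_iff (k : Int) (maps : List (List Int)) (n : Int) :
    D_make_gold k maps n ↔ (2 ≤ k ∧ ∃ r c : Int, 1 ≤ r ∧ r < n ∧ r ≤ 2 * k - 1 ∧ 0 ≤ c ∧ c < n ∧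
      PySem.List.pyGetD (PySem.List.pyGetD maps r []) c 0 = 1) := by
  unfold D_make_gold
  constructor
  · rintro ⟨hk, ⟨row, rn⟩, hpm, h1, h2, h3, ⟨v, cn⟩, hqm, hcn, hv⟩
    rw [List.mk_mem_zipIdx_iff_getElem?] at hpm hqm
    refine ⟨hk, (rn : Int), (cn : Int), by exact_mod_cast h1, h2, h3, by positivity, hcn, ?_⟩
    simp only [PySem.List.pyGetD_natCast, List.getD_eq_getElem?_getD]
    rw [hpm, Option.getD_some, hqm, Option.getD_some]
    exact hv
  · rintro ⟨hk, r, c, h1, h2, h3, hc0, hcn, hval⟩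
    have hr0 : (0 : Int) ≤ r := by omega
    have hrc : ((r.toNat : Nat) : Int) = r := by omega
    have hcc : ((c.toNat : Nat) : Int) = c := by omega
    rw [← hrc, ← hcc] at hval
    simp only [PySem.List.pyGetD_natCast, List.getD_eq_getElem?_getD] at hval
    cases hrow : maps[r.toNat]? with
    | none => rw [hrow] at hval; simp at hval
    | some row =>
        rw [hrow, Option.getD_some] at hval
        cases hcell : row[c.toNat]? with
        | none => rw [hcell] at hval; simp at hval
        | some v =>
            rw [hcell, Option.getD_some] at hval
            exact ⟨hk, ⟨row, r.toNat⟩, List.mk_mem_zipIdx_iff_getElem?.2 hrow,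
              by omega, by omega, by omega,
              ⟨v, c.toNat⟩, List.mk_mem_zipIdx_iff_getElem?.2 hcell, by omega, hval⟩

-- indicator of a 1 at column c of a row
def pvI1 (row : List Int) (c : Int) : Int := if PySem.List.pyGetD row c 0 == 1 then 1 else 0

-- bounds-guarded indicator of a 1 at (r, c)
def pvGI (maps : List (List Int)) (n r c : Int) : Int :=
  if 0 ≤ r ∧ r < n ∧ 0 ≤ c ∧ c < n then pvI1 (PySem.List.pyGetD maps r []) c else 0

-- row-r contribution to the count at cell (i, j)
def pvG (k : Int) (maps : List (List Int)) (n i j r : Int) : Int :=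
  ((PySem.List.pyRange (j - (k - |r - i|)) (j + (k - |r - i|) + 1) 1).map
    (fun c => pvGI maps n r c)).sum

-- prefix count of ones among the first a columns of a row
def pvPref (row : List Int) (a : Int) : Int :=
  ((PySem.List.pyRange 0 a 1).map (pvI1 row)).sum

-- per-cell body of A, k == 1 branch
def cellA1 (k : Int) (maps : List (List Int)) (n i j : Int) : Int :=
  let dx : List Int := [k, -k, 0, 0]
  let dy : List Int := [0, 0, k, -k]
  let gold0 : Int := if PySem.List.pyGetD (PySem.List.pyGetD maps i []) j 0 == 1 then 1 else 0
  (PySem.List.pyRange 0 4 1).foldl (fun g d =>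
    let ddx := PySem.List.pyGetD dx d 0
    let ddy := PySem.List.pyGetD dy d 0
    if i + ddx < 0 ∨ j + ddy < 0 ∨ i + ddx ≥ n ∨ j + ddy ≥ n then g
    else if PySem.List.pyGetD (PySem.List.pyGetD maps (i + ddx) []) (j + ddy) 0 == 1 then g + 1 else g) gold0

-- per-cell body of A, general branch
def cellA2 (k : Int) (maps : List (List Int)) (n i j : Int) : Int :=
  let g1 := (PySem.List.pyRange 0 k 1).foldl (fun g idx =>
    (PySem.List.pyRange (j - idx) (j + idx + 1) 1).foldl (fun g idy =>
      if i - k + idx < 0 ∨ i - k + idx ≥ n ∨ idy ≥ n ∨ idy < 0 then g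
      else
        let g := if PySem.List.pyGetD (PySem.List.pyGetD maps (i - k + idx) []) idy 0 == 1 then g + 1 else g
        if i + k - idx < 0 ∨ i + k - idx ≥ n then g
        else if PySem.List.pyGetD (PySem.List.pyGetD maps (i + k - idx) []) idy 0 == 1 then g + 1 else g) g) (0 : Int)
  (PySem.List.pyRange (j - k) (j + k + 1) 1).foldl (fun g c =>
    if c < 0 ∨ c ≥ n then g
    else if PySem.List.pyGetD (PySem.List.pyGetD maps i []) c 0 == 1 then g + 1 else g) g1

-- the prefix table of B
def pvTable (maps : List (List Int)) (n : Int) : List (List Int) :=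
  (PySem.List.pyRange 0 n 1).foldl (fun P r =>
    let row := PySem.List.pyGetD maps r []
    let ps : List Int := (PySem.List.pyRange 0 n 1).foldl (fun ps c =>
      ps ++ [PySem.List.pyGetD ps (-1) 0 + (if PySem.List.pyGetD row c 0 == 1 then 1 else 0)]) [(0 : Int)]
    P ++ [ps]) []

-- per-cell body of B
def cellB (k : Int) (maps : List (List Int)) (n i j : Int) : Int :=
  let P := pvTable maps n
  (PySem.List.pyRange (max 0 (i - k)) (min (n - 1) (i + k) + 1) 1).foldl (fun t r =>
    let w := k - |r - i|
    let lo := max 0 (j - w)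
    let hi := min (n - 1) (j + w)
    if lo ≤ hi then
      t + (PySem.List.pyGetD (PySem.List.pyGetD P r []) (hi + 1) 0 -
           PySem.List.pyGetD (PySem.List.pyGetD P r []) lo 0)
    else t) (0 : Int)

theorem flatten_map_singleton {α β : Type} (l : List α) (f : α → β) :
    (l.map (fun x => [f x])).flatten = l.map f := by
  induction l with
  | nil => rfl
  | cons a t ih => simp [ih]

theorem sum_map_pyRange_eq_Icc (f : Int → Int) (a b : Int) :
    ((PySem.List.pyRange a b 1).map f).sum = ∑ r ∈ Finset.Icc a (b - 1), f r := by
  by_cases h0 : b ≤ a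
  · rw [PySem.List.pyRange_one_eq_nil h0, Finset.Icc_eq_empty (by omega)]; simp
  · have h : a < b := by omega
    have hn : ∃ m, (b - a).toNat = m + 1 := ⟨(b - a).toNat - 1, by omega⟩
    obtain ⟨m, hm⟩ := hn
    clear h0
    induction m generalizing a with
    | zero =>
        have hb : b = a + 1 := by omega
        subst hb
        rw [PySem.List.pyRange_one_singleton]
        simp
    | succ m ih =>
        rw [PySem.List.pyRange_one_cons h]
        have hins : Finset.Icc a (b - 1) = insert a (Finset.Icc (a + 1) (b - 1)) :=
          (Finset.insert_Icc_add_one_left_eq_Icc (by omega)).symm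
        rw [hins, Finset.sum_insert (by simp)]
        simp only [List.map_cons, List.sum_cons]
        rw [ih (a + 1) (by omega) (by omega)]

theorem A_flat (k : Int) (maps : List (List Int)) (n : Int) :
    make_gold k maps n = (PySem.List.pyRange 0 n 1).flatMap (fun i =>
      (PySem.List.pyRange 0 n 1).map (fun j =>
        if k == 1 then cellA1 k maps n i j else cellA2 k maps n i j)) := by
  by_cases hk : k == 1 <;>
    simp [make_gold, cellA1, cellA2, hk, List.flatMap_def, flatten_map_singleton]

theorem B_flat (k : Int) (maps : List (List Int)) (n : Int) :
    make_gold_alt k maps n = (PySem.List.pyRange 0 n 1).flatMap (fun i =>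
      (PySem.List.pyRange 0 n 1).map (fun j => cellB k maps n i j)) := by
  simp [make_gold_alt, cellB, pvTable, List.flatMap_def, flatten_map_singleton]

theorem pvGI_zero_row (maps : List (List Int)) (n r c : Int) (h : r < 0 ∨ n ≤ r) :
    pvGI maps n r c = 0 := by
  unfold pvGI; split_ifs with h1
  · omega
  · rfl

theorem pvGI_zero' (maps : List (List Int)) (n r c : Int) (h : ¬ (0 ≤ r ∧ r < n ∧ 0 ≤ c ∧ c < n)) :
    pvGI maps n r c = 0 := by
  unfold pvGI; rw [if_neg h]

theorem pvGI_nonneg (maps : List (List Int)) (n r c : Int) : 0 ≤ pvGI maps n r c := by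
  unfold pvGI pvI1; split_ifs <;> omega

theorem pvG_Icc (k : Int) (maps : List (List Int)) (n i j r : Int) :
    pvG k maps n i j r =
      ∑ c ∈ Finset.Icc (j - (k - |r - i|)) (j + (k - |r - i|)), pvGI maps n r c := by
  unfold pvG
  rw [sum_map_pyRange_eq_Icc]
  have h : j + (k - |r - i|) + 1 - 1 = j + (k - |r - i|) := by ring
  rw [h]

theorem pvG_zero_row (k : Int) (maps : List (List Int)) (n i j r : Int) (h : r < 0 ∨ n ≤ r) :
    pvG k maps n i j r = 0 := by
  rw [pvG_Icc]
  exact Finset.sum_eq_zero (fun c _ => pvGI_zero_row maps n r c h)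

theorem pvG_nonneg (k : Int) (maps : List (List Int)) (n i j r : Int) :
    0 ≤ pvG k maps n i j r := by
  rw [pvG_Icc]
  exact Finset.sum_nonneg (fun c _ => pvGI_nonneg maps n r c)

theorem pvPref_succ (row : List Int) (a : Int) (h : 0 ≤ a) :
    pvPref row (a + 1) = pvPref row a + pvI1 row a := by
  unfold pvPref
  rw [PySem.List.pyRange_one_succ_right h, List.map_append, List.sum_append]
  simp

-- structure of one prefix row
theorem ps_struct (row : List Int) (M : Nat) :
    (PySem.List.pyRange 0 (M : Int) 1).foldl (fun ps c =>
      ps ++ [PySem.List.pyGetD ps (-1) 0 + (if PySem.List.pyGetD row c 0 == 1 then 1 else 0)]) [(0 : Int)]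
    = (PySem.List.pyRange 0 ((M : Int) + 1) 1).map (pvPref row) := by
  induction M with
  | zero =>
      rw [PySem.List.pyRange_one_eq_nil (by omega), List.foldl_nil]
      simp only [Nat.cast_zero]
      rw [PySem.List.pyRange_one_singleton]
      simp [pvPref, PySem.List.pyRange_one_eq_nil]
  | succ M ih =>
      have hc : ((M + 1 : Nat) : Int) = (M : Int) + 1 := by push_cast; ring
      rw [hc, PySem.List.pyRange_one_succ_right (by positivity), List.foldl_append, ih]
      simp only [List.foldl_cons, List.foldl_nil]
      rw [PySem.List.pyRange_one_succ_right (a := 0) (by positivity), List.map_append,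
        List.map_cons, List.map_nil, PySem.List.pyGetD_neg_one_append_singleton]
      have h2 : PySem.List.pyRange 0 ((M : Int) + 1 + 1) 1
          = PySem.List.pyRange 0 ((M : Int) + 1) 1 ++ [(M : Int) + 1] :=
        PySem.List.pyRange_one_succ_right (by positivity)
      rw [h2, List.map_append, List.map_cons, List.map_nil,
        PySem.List.pyRange_one_succ_right (a := 0) (by positivity), List.map_append,
        List.map_cons, List.map_nil]
      have h3 : pvPref row ((M : Int) + 1) = pvPref row M + pvI1 row M :=
        pvPref_succ row M (by positivity)
      simp only [pvI1] at h3
      rw [h3]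

theorem table_get (maps : List (List Int)) (n r : Int) (h0 : 0 ≤ r) (h1 : r < n) :
    PySem.List.pyGetD (pvTable maps n) r [] =
      (PySem.List.pyRange 0 (n + 1) 1).map (pvPref (PySem.List.pyGetD maps r [])) := by
  have hmain : pvTable maps n = (PySem.List.pyRange 0 n 1).map (fun r =>
      (PySem.List.pyRange 0 n 1).foldl (fun ps c =>
        ps ++ [PySem.List.pyGetD ps (-1) 0 +
          (if PySem.List.pyGetD (PySem.List.pyGetD maps r []) c 0 == 1 then 1 else 0)]) [(0 : Int)]) := by
    simp only [pvTable]
    rw [PySem.List.foldl_append_singleton_eq_map]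
    simp
  rw [hmain, PySem.List.pyGetD_map_pyRange_of_nonneg _ _ _ _ h0 h1]
  have hcast : n = ((n.toNat : Nat) : Int) := by omega
  rw [hcast, ps_struct]

theorem pvPref_diff (row : List Int) (a b : Int) (h0 : 0 ≤ a) (h : a ≤ b) :
    pvPref row b - pvPref row a = ∑ c ∈ Finset.Icc a (b - 1), pvI1 row c := by
  unfold pvPref
  rw [PySem.List.pyRange_one_append 0 a b h0 h, List.map_append, List.sum_append]
  simp only [sum_map_pyRange_eq_Icc]
  ring

theorem clip_sum (maps : List (List Int)) (n r j w : Int) (hr0 : 0 ≤ r) (hrn : r < n) :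
    ∑ c ∈ Finset.Icc (j - w) (j + w), pvGI maps n r c =
      ∑ c ∈ Finset.Icc (max 0 (j - w)) (min (n - 1) (j + w)),
        pvI1 (PySem.List.pyGetD maps r []) c := by
  have hsub : Finset.Icc (max 0 (j - w)) (min (n - 1) (j + w)) ⊆ Finset.Icc (j - w) (j + w) :=
    Finset.Icc_subset_Icc (by omega) (by omega)
  rw [← Finset.sum_subset hsub (fun c hc hnc => by
    rw [Finset.mem_Icc] at hc
    rw [Finset.mem_Icc] at hnc
    exact pvGI_zero' maps n r c (by omega))]
  refine Finset.sum_congr rfl (fun c hc => ?_)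
  rw [Finset.mem_Icc] at hc
  unfold pvGI
  rw [if_pos (by omega)]

theorem cellB_eq (k : Int) (maps : List (List Int)) (n i j : Int)
    (hi0 : 0 ≤ i) (hin : i < n) :
    cellB k maps n i j =
      ∑ r ∈ Finset.Icc (max 0 (i - k)) (min (n - 1) (i + k)), pvG k maps n i j r := by
  simp only [cellB]
  have hf : (fun (t r : Int) =>
      if max 0 (j - (k - |r - i|)) ≤ min (n - 1) (j + (k - |r - i|)) then
        t + (PySem.List.pyGetD (PySem.List.pyGetD (pvTable maps n) r []) (min (n - 1) (j + (k - |r - i|)) + 1) 0 -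
             PySem.List.pyGetD (PySem.List.pyGetD (pvTable maps n) r []) (max 0 (j - (k - |r - i|))) 0)
      else t)
      = (fun (t r : Int) => t +
        (if max 0 (j - (k - |r - i|)) ≤ min (n - 1) (j + (k - |r - i|)) then
          PySem.List.pyGetD (PySem.List.pyGetD (pvTable maps n) r []) (min (n - 1) (j + (k - |r - i|)) + 1) 0 -
          PySem.List.pyGetD (PySem.List.pyGetD (pvTable maps n) r []) (max 0 (j - (k - |r - i|))) 0 else 0)) := by
    funext t r; split_ifs <;> ring
  rw [hf, PySem.List.foldl_add, sum_map_pyRange_eq_Icc, zero_add, add_sub_cancel_right]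
  refine Finset.sum_congr rfl (fun r hr => ?_)
  rw [Finset.mem_Icc] at hr
  rw [table_get _ _ _ (by omega) (by omega)]
  by_cases hlohi : max 0 (j - (k - |r - i|)) ≤ min (n - 1) (j + (k - |r - i|))
  · rw [if_pos hlohi,
      PySem.List.pyGetD_map_pyRange_of_nonneg _ _ _ _ (by omega) (by omega),
      PySem.List.pyGetD_map_pyRange_of_nonneg _ _ _ _ (by omega) (by omega),
      pvPref_diff _ _ _ (by omega) (by omega), pvG_Icc,
      clip_sum maps n r j (k - |r - i|) (by omega) (by omega)]
    simp only [add_sub_cancel_right]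
  · rw [if_neg hlohi, pvG_Icc]
    symm
    exact Finset.sum_eq_zero (fun c hc => by
      rw [Finset.mem_Icc] at hc
      exact pvGI_zero' _ _ _ _ (by omega))

theorem sum_Icc_shift (f : Int → Int) (a b d : Int) :
    ∑ r ∈ Finset.Icc (d + a) (d + b), f r = ∑ x ∈ Finset.Icc a b, f (d + x) := by
  rw [← Finset.map_add_left_Icc, Finset.sum_map]
  rfl

theorem sum_Icc_reflect (f : Int → Int) (a b c : Int) :
    ∑ x ∈ Finset.Icc a b, f (c - x) = ∑ r ∈ Finset.Icc (c - b) (c - a), f r := by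
  refine Finset.sum_nbij' (fun x => c - x) (fun r => c - r) ?_ ?_ ?_ ?_ ?_ <;>
    intro x hx <;> simp [Finset.mem_Icc] at * <;> omega

theorem cellA2_eq (k : Int) (maps : List (List Int)) (n i j : Int)
    (hi0 : 0 ≤ i) (hin : i < n) :
    cellA2 k maps n i j =
      ∑ r ∈ Finset.Icc (i - k) (i + k), (if r ≤ 2 * i then pvG k maps n i j r else 0) := by
  by_cases hkneg : k < 0
  · simp only [cellA2]
    rw [PySem.List.pyRange_one_eq_nil (show k ≤ (0 : Int) by omega), List.foldl_nil,
      PySem.List.pyRange_one_eq_nil (by omega), List.foldl_nil,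
      Finset.Icc_eq_empty (by omega), Finset.sum_empty]
  · have hk0 : (0 : Int) ≤ k := by omega
    simp only [cellA2]
    have hmem : ∀ (acc x : Int), x ∈ PySem.List.pyRange 0 k 1 →
        (PySem.List.pyRange (j - x) (j + x + 1) 1).foldl (fun g idy =>
          if i - k + x < 0 ∨ i - k + x ≥ n ∨ idy ≥ n ∨ idy < 0 then g
          else
            let g := if PySem.List.pyGetD (PySem.List.pyGetD maps (i - k + x) []) idy 0 == 1 then g + 1 else g
            if i + k - x < 0 ∨ i + k - x ≥ n then g
            else if PySem.List.pyGetD (PySem.List.pyGetD maps (i + k - x) []) idy 0 == 1 then g + 1 else g) acc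
        = acc + ((∑ idy ∈ Finset.Icc (j - x) (j + x), pvGI maps n (i - k + x) idy)
               + (if 0 ≤ i - k + x then
                    ∑ idy ∈ Finset.Icc (j - x) (j + x), pvGI maps n (i + k - x) idy
                  else 0)) := by
      intro acc x hx
      have hb := (PySem.List.mem_pyRange_one).1 hx
      have hf : (fun (g idy : Int) =>
          if i - k + x < 0 ∨ i - k + x ≥ n ∨ idy ≥ n ∨ idy < 0 then g
          else
            let g := if PySem.List.pyGetD (PySem.List.pyGetD maps (i - k + x) []) idy 0 == 1 then g + 1 else g
            if i + k - x < 0 ∨ i + k - x ≥ n then g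
            else if PySem.List.pyGetD (PySem.List.pyGetD maps (i + k - x) []) idy 0 == 1 then g + 1 else g)
          = (fun (g idy : Int) => g + (pvGI maps n (i - k + x) idy
              + (if 0 ≤ i - k + x then pvGI maps n (i + k - x) idy else 0))) := by
        funext g idy
        simp only [pvGI, pvI1]
        split_ifs <;> omega
      rw [hf, PySem.List.foldl_add, sum_map_pyRange_eq_Icc, add_sub_cancel_right,
        Finset.sum_add_distrib]
      congr 1
      by_cases hc : 0 ≤ i - k + x <;> simp [hc]
    have hOuter := PySem.List.foldl_congr_mem (l := PySem.List.pyRange 0 k 1) (init := (0 : Int))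
      (f := fun g idx => (PySem.List.pyRange (j - idx) (j + idx + 1) 1).foldl (fun g idy =>
          if i - k + idx < 0 ∨ i - k + idx ≥ n ∨ idy ≥ n ∨ idy < 0 then g
          else
            let g := if PySem.List.pyGetD (PySem.List.pyGetD maps (i - k + idx) []) idy 0 == 1 then g + 1 else g
            if i + k - idx < 0 ∨ i + k - idx ≥ n then g
            else if PySem.List.pyGetD (PySem.List.pyGetD maps (i + k - idx) []) idy 0 == 1 then g + 1 else g) g)
      (g := fun g idx => g + ((∑ idy ∈ Finset.Icc (j - idx) (j + idx), pvGI maps n (i - k + idx) idy)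
               + (if 0 ≤ i - k + idx then
                    ∑ idy ∈ Finset.Icc (j - idx) (j + idx), pvGI maps n (i + k - idx) idy
                  else 0))) hmem
    rw [hOuter, PySem.List.foldl_add, sum_map_pyRange_eq_Icc, zero_add]
    have hmid : (fun (g c : Int) =>
        if c < 0 ∨ c ≥ n then g
        else if PySem.List.pyGetD (PySem.List.pyGetD maps i []) c 0 == 1 then g + 1 else g)
        = (fun (g c : Int) => g + pvGI maps n i c) := by
      funext g c
      simp only [pvGI, pvI1]
      split_ifs <;> omega
    rw [hmid, PySem.List.foldl_add, sum_map_pyRange_eq_Icc]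
    have hb1 : j + k + 1 - 1 = j + k := by ring
    rw [hb1]
    have hsplit : Finset.Icc (i - k) (i + k) = Finset.Icc (i - k) (i - 1) ∪ Finset.Icc i (i + k) := by
      ext x; simp only [Finset.mem_Icc, Finset.mem_union]; omega
    have hdisj : Disjoint (Finset.Icc (i - k) (i - 1)) (Finset.Icc i (i + k)) := by
      rw [Finset.disjoint_left]
      intro x hx hx2
      simp only [Finset.mem_Icc] at hx hx2
      omega
    have hins : Finset.Icc i (i + k) = insert i (Finset.Icc (i + 1) (i + k)) :=
      (Finset.insert_Icc_add_one_left_eq_Icc (by omega)).symm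
    rw [hsplit, Finset.sum_union hdisj, hins,
      Finset.sum_insert (by simp only [Finset.mem_Icc]; omega), if_pos (by omega)]
    have hTop : ∑ r ∈ Finset.Icc (i - k) (i - 1), (if r ≤ 2 * i then pvG k maps n i j r else 0)
        = ∑ idx ∈ Finset.Icc 0 (k - 1), ∑ idy ∈ Finset.Icc (j - idx) (j + idx), pvGI maps n (i - k + idx) idy := by
      have he : Finset.Icc (i - k) (i - 1) = Finset.Icc ((i - k) + 0) ((i - k) + (k - 1)) := by
        congr 1 <;> ring
      rw [he, sum_Icc_shift]
      refine Finset.sum_congr rfl (fun idx hidx => ?_)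
      rw [Finset.mem_Icc] at hidx
      rw [if_pos (by omega), pvG_Icc]
      have habs : k - |i - k + idx - i| = idx := by
        have h' : i - k + idx - i = idx - k := by ring
        rw [h', abs_of_nonpos (by omega)]
        ring
      rw [habs]
    have hBot : ∑ r ∈ Finset.Icc (i + 1) (i + k), (if r ≤ 2 * i then pvG k maps n i j r else 0)
        = ∑ idx ∈ Finset.Icc 0 (k - 1), (if 0 ≤ i - k + idx then
            ∑ idy ∈ Finset.Icc (j - idx) (j + idx), pvGI maps n (i + k - idx) idy else 0) := by
      have hrefl := sum_Icc_reflect (fun r => if r ≤ 2 * i then pvG k maps n i j r else 0) 0 (k - 1) (i + k)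
      beta_reduce at hrefl
      rw [show i + k - (k - 1) = i + 1 by ring, show i + k - 0 = i + k by ring] at hrefl
      rw [← hrefl]
      refine Finset.sum_congr rfl (fun idx hidx => ?_)
      rw [Finset.mem_Icc] at hidx
      by_cases hc : 0 ≤ i - k + idx
      · rw [if_pos (by omega), if_pos hc, pvG_Icc]
        have habs : k - |i + k - idx - i| = idx := by
          have h' : i + k - idx - i = k - idx := by ring
          rw [h', abs_of_nonneg (by omega)]
          ring
        rw [habs]
      · rw [if_neg (by omega), if_neg hc]
    have hMid : ∑ c ∈ Finset.Icc (j - k) (j + k), pvGI maps n i c = pvG k maps n i j i := by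
      rw [pvG_Icc]
      have habs : k - |i - i| = k := by simp
      rw [habs]
    rw [hTop, hBot, hMid, Finset.sum_add_distrib]
    ring

theorem cellA1_eq (maps : List (List Int)) (n i j : Int)
    (hi0 : 0 ≤ i) (hin : i < n) (hj0 : 0 ≤ j) (hjn : j < n) :
    cellA1 1 maps n i j =
      ∑ r ∈ Finset.Icc (i - 1) (i + 1), pvG 1 maps n i j r := by
  simp only [cellA1]
  rw [show PySem.List.pyRange 0 4 1 = [0, 1, 2, 3] from by decide]
  simp only [List.foldl_cons, List.foldl_nil]
  rw [show PySem.List.pyGetD ([1, -1, 0, 0] : List Int) 0 0 = 1 from by decide,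
    show PySem.List.pyGetD ([0, 0, 1, -1] : List Int) 0 0 = 0 from by decide,
    show PySem.List.pyGetD ([1, -1, 0, 0] : List Int) 1 0 = -1 from by decide,
    show PySem.List.pyGetD ([0, 0, 1, -1] : List Int) 1 0 = 0 from by decide,
    show PySem.List.pyGetD ([1, -1, 0, 0] : List Int) 2 0 = 0 from by decide,
    show PySem.List.pyGetD ([0, 0, 1, -1] : List Int) 2 0 = 1 from by decide,
    show PySem.List.pyGetD ([1, -1, 0, 0] : List Int) 3 0 = 0 from by decide,
    show PySem.List.pyGetD ([0, 0, 1, -1] : List Int) 3 0 = -1 from by decide]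
  have step : ∀ (r c X : Int),
      (if r < 0 ∨ c < 0 ∨ r ≥ n ∨ c ≥ n then X
       else if PySem.List.pyGetD (PySem.List.pyGetD maps r []) c 0 == 1 then X + 1 else X)
      = X + pvGI maps n r c := by
    intro r c X
    simp only [pvGI, pvI1]
    split_ifs <;> omega
  simp only [add_zero]
  rw [show i + -1 = i - 1 from by ring, show j + -1 = j - 1 from by ring]
  rw [step, step, step, step]
  have hgold : (if PySem.List.pyGetD (PySem.List.pyGetD maps i []) j 0 == 1 then (1 : Int) else 0)
      = pvGI maps n i j := by
    simp only [pvGI, pvI1]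
    rw [if_pos (show 0 ≤ i ∧ i < n ∧ 0 ≤ j ∧ j < n from ⟨hi0, hin, hj0, hjn⟩)]
  rw [hgold]
  have g1 : pvG 1 maps n i j (i - 1) = pvGI maps n (i - 1) j := by
    rw [pvG_Icc, show (1 : Int) - |i - 1 - i| = 0 from by
      rw [show i - 1 - i = (-1 : Int) from by ring]; norm_num]
    simp
  have g3 : pvG 1 maps n i j (i + 1) = pvGI maps n (i + 1) j := by
    rw [pvG_Icc, show (1 : Int) - |i + 1 - i| = 0 from by
      rw [show i + 1 - i = (1 : Int) from by ring]; norm_num]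
    simp
  have g2 : pvG 1 maps n i j i = pvGI maps n i (j - 1) + pvGI maps n i j + pvGI maps n i (j + 1) := by
    rw [pvG_Icc, show (1 : Int) - |i - i| = 1 from by simp]
    rw [show Finset.Icc (j - 1) (j + 1) = {j - 1, j, j + 1} from by
      ext x; simp only [Finset.mem_Icc, Finset.mem_insert, Finset.mem_singleton]; omega]
    rw [Finset.sum_insert (by simp only [Finset.mem_insert, Finset.mem_singleton]; omega),
      Finset.sum_insert (by simp only [Finset.mem_singleton]; omega), Finset.sum_singleton]
    ring
  rw [show Finset.Icc (i - 1) (i + 1) = {i - 1, i, i + 1} from by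
    ext x; simp only [Finset.mem_Icc, Finset.mem_insert, Finset.mem_singleton]; omega]
  rw [Finset.sum_insert (by simp only [Finset.mem_insert, Finset.mem_singleton]; omega),
    Finset.sum_insert (by simp only [Finset.mem_singleton]; omega), Finset.sum_singleton,
    g1, g2, g3]
  ring

theorem sum_pvG_clip (k : Int) (maps : List (List Int)) (n i j a b : Int) :
    ∑ r ∈ Finset.Icc (max 0 a) (min (n - 1) b), pvG k maps n i j r
      = ∑ r ∈ Finset.Icc a b, pvG k maps n i j r := by
  refine Finset.sum_subset (Finset.Icc_subset_Icc (by omega) (by omega)) ?_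
  intro r hr hnr
  rw [Finset.mem_Icc] at hr
  rw [Finset.mem_Icc] at hnr
  exact pvG_zero_row k maps n i j r (by omega)

-- inside the diamond but below the row-2i line, with no 1 in the reachable band, the row sum is 0
theorem pvG_zero_of_noD (k : Int) (maps : List (List Int)) (n i j r : Int)
    (hnD : ¬ D_make_gold k maps n) (hk : k ≠ 1)
    (hi0 : 0 ≤ i) (hr1 : i - k ≤ r) (hr2 : r ≤ i + k) (h2i : 2 * i < r) :
    pvG k maps n i j r = 0 := by
  by_cases hk2 : 2 ≤ k
  · by_cases hrow : r < 0 ∨ n ≤ r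
    · exact pvG_zero_row k maps n i j r hrow
    · rw [pvG_Icc]
      refine Finset.sum_eq_zero (fun c hc => ?_)
      rw [Finset.mem_Icc] at hc
      by_cases hcb : 0 ≤ c ∧ c < n
      · unfold pvGI pvI1
        rw [if_pos (by omega)]
        have hne : ¬ PySem.List.pyGetD (PySem.List.pyGetD maps r []) c 0 = 1 := by
          intro h1
          exact hnD ((D_iff k maps n).2
            ⟨hk2, r, c, by omega, by omega, by omega, by omega, by omega, h1⟩)
        simp [hne]
      · exact pvGI_zero' maps n r c (by omega)
  · -- k ≤ 0 here (k ≠ 1, ¬ 2 ≤ k, and r in the band forces k ≥ 0): r ≤ i + k ≤ i ≤ 2i, contradiction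
    omega

theorem cell_eq (k : Int) (maps : List (List Int)) (n i j : Int)
    (hnD : ¬ D_make_gold k maps n)
    (hi0 : 0 ≤ i) (hin : i < n) (hj0 : 0 ≤ j) (hjn : j < n) :
    (if k == 1 then cellA1 k maps n i j else cellA2 k maps n i j) = cellB k maps n i j := by
  by_cases hk1 : (k == 1) = true
  · rw [beq_iff_eq] at hk1
    subst hk1
    rw [if_pos (by norm_num), cellA1_eq maps n i j hi0 hin hj0 hjn, cellB_eq 1 maps n i j hi0 hin,
      sum_pvG_clip]
  · rw [if_neg hk1, cellA2_eq k maps n i j hi0 hin, cellB_eq k maps n i j hi0 hin, sum_pvG_clip]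
    refine Finset.sum_congr rfl (fun r hr => ?_)
    rw [Finset.mem_Icc] at hr
    by_cases h2i : r ≤ 2 * i
    · rw [if_pos h2i]
    · rw [if_neg h2i,
        pvG_zero_of_noD k maps n i j r hnD (by simpa using hk1) hi0 hr.1 hr.2 (by omega)]

-- sums over the flattened output
theorem sum_flat (n : Int) (f : Int → Int → Int) :
    ((PySem.List.pyRange 0 n 1).flatMap (fun i =>
      (PySem.List.pyRange 0 n 1).map (fun j => f i j))).sum
    = ∑ i ∈ Finset.Icc 0 (n - 1), ∑ j ∈ Finset.Icc 0 (n - 1), f i j := by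
  rw [List.flatMap_def, List.sum_flatten, List.map_map]
  have h : (List.sum ∘ fun i => (PySem.List.pyRange 0 n 1).map (fun j => f i j))
      = fun i => ∑ j ∈ Finset.Icc 0 (n - 1), f i j := by
    funext i
    exact sum_map_pyRange_eq_Icc (fun j => f i j) 0 n
  rw [h, sum_map_pyRange_eq_Icc]

-- ===== VERDICT (by name: the statement is the Claim_ definition above) =====
theorem make_gold_spec : Claim_unchanged_make_gold := by
  intro k maps n _ _
  unfold Spec_make_gold
  intro hnD
  rw [A_flat, B_flat, List.flatMap_def, List.flatMap_def]
  refine congrArg List.flatten (List.map_congr_left (fun i hi => ?_))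
  refine List.map_congr_left (fun j hj => ?_)
  have hbi := (PySem.List.mem_pyRange_one).1 hi
  have hbj := (PySem.List.mem_pyRange_one).1 hj
  exact cell_eq k maps n i j hnD hbi.1 hbi.2 hbj.1 hbj.2

theorem make_gold_changed : Claim_changed_make_gold := by
  unfold Claim_changed_make_gold; decide

theorem make_gold_tight : Claim_exact_make_gold := by
  intro k maps n _ _ hD h
  obtain ⟨hk2, r0, c0, hr01, hr02, hr0k, hc01, hc02, hone⟩ := (D_iff k maps n).1 hD
  have hr0 : 1 ≤ r0 ∧ r0 < n := ⟨hr01, hr02⟩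
  have hc0 : 0 ≤ c0 ∧ c0 < n := ⟨hc01, hc02⟩
  have hn2 : 2 ≤ n := by omega
  -- the affected cell
  set i0 : Int := max 0 (r0 - k) with hi0def
  have hi00 : 0 ≤ i0 := by omega
  have hi0n : i0 < n := by omega
  have h2i0 : 2 * i0 < r0 := by omega
  have hr0band : i0 - k ≤ r0 ∧ r0 ≤ i0 + k := by omega
  have hk1 : (k == 1) = false := by simp; omega
  -- per-cell: A ≤ B everywhere
  have hle : ∀ i j : Int, i ∈ Finset.Icc 0 (n - 1) →
      (if k == 1 then cellA1 k maps n i j else cellA2 k maps n i j) ≤ cellB k maps n i j := by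
    intro i j hi
    rw [Finset.mem_Icc] at hi
    rw [hk1, if_neg (by simp), cellA2_eq k maps n i j hi.1 (by omega),
      cellB_eq k maps n i j hi.1 (by omega), sum_pvG_clip]
    refine Finset.sum_le_sum (fun r hr => ?_)
    by_cases h2i : r ≤ 2 * i
    · rw [if_pos h2i]
    · rw [if_neg h2i]; exact pvG_nonneg k maps n i j r
  -- strict at (i0, c0)
  have hstrict : (if k == 1 then cellA1 k maps n i0 c0 else cellA2 k maps n i0 c0)
      < cellB k maps n i0 c0 := by
    rw [hk1, if_neg (by simp), cellA2_eq k maps n i0 c0 hi00 hi0n,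
      cellB_eq k maps n i0 c0 hi00 hi0n, sum_pvG_clip]
    refine Finset.sum_lt_sum (fun r hr => ?_) ⟨r0, by rw [Finset.mem_Icc]; omega, ?_⟩
    · by_cases h2i : r ≤ 2 * i0
      · rw [if_pos h2i]
      · rw [if_neg h2i]; exact pvG_nonneg k maps n i0 c0 r
    · rw [if_neg (by omega)]
      have hw : 0 ≤ k - |r0 - i0| := by
        rcases abs_cases (r0 - i0) with ⟨ha, _⟩ | ⟨ha, _⟩ <;> omega
      have h1le : (1 : Int) ≤ pvG k maps n i0 c0 r0 := by
        rw [pvG_Icc]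
        have hmem : c0 ∈ Finset.Icc (c0 - (k - |r0 - i0|)) (c0 + (k - |r0 - i0|)) := by
          rw [Finset.mem_Icc]; omega
        have h1 : pvGI maps n r0 c0 = 1 := by
          unfold pvGI pvI1
          rw [if_pos (by omega)]
          simp [hone]
        calc (1 : Int) = pvGI maps n r0 c0 := h1.symm
          _ ≤ ∑ c ∈ Finset.Icc (c0 - (k - |r0 - i0|)) (c0 + (k - |r0 - i0|)), pvGI maps n r0 c :=
            Finset.single_le_sum (fun c _ => pvGI_nonneg maps n r0 c) hmem
      omega
  -- sums of the two outputs differ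
  have hsum : (make_gold k maps n).sum < (make_gold_alt k maps n).sum := by
    rw [A_flat, B_flat, sum_flat, sum_flat]
    refine Finset.sum_lt_sum (fun i hi => Finset.sum_le_sum (fun j _ => hle i j hi))
      ⟨i0, by rw [Finset.mem_Icc]; omega, ?_⟩
    refine Finset.sum_lt_sum (fun j _ => hle i0 j (by rw [Finset.mem_Icc]; omega))
      ⟨c0, by rw [Finset.mem_Icc]; omega, hstrict⟩
  rw [h] at hsum
  omega
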